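-- pv_equiv track=rewrite | github.com/linhdvu14/cp-sols | sols/AtCoder/abc257/C_Robot_Takahashi.py | solve
-- ===== SOURCE A (Python) =====
-- def solve(N, A, W):
--     idx = sorted(list(range(N)), key=lambda i: W[i])
--     A = [A[i] for i in idx]
--     W = [W[i] for i in idx]
--
--     tot = sum(A)
--     res = min(tot, N - tot)
--     cur = i = 0
--     while i < N:
--         j = i
--         while j < N and W[j] == W[i]:
--             cur += A[j]
--             j += 1
--         cand = cur + N - tot - (j - cur)
--         res = min(res, cand)
--         i = j
--
--     return N - res
-- ===== SOURCE B (Python) =====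
-- def solve(N, A, W):
--     # threshold-enumeration: for each distinct weight, count people classified
--     # correctly with that threshold by a direct pass; no sorting.
--     tot = 0
--     for i in range(N):
--         tot += A[i]
--     best = max(tot, N - tot)
--     seen = set()
--     for i in range(N):
--         w = W[i]
--         if w not in seen:
--             seen.add(w)
--             k = 0
--             s = 0
--             for j in range(N):
--                 if W[j] <= w:
--                     k += 1
--                     s += A[j]
--             best = max(best, k + tot - 2 * s)
--     return best
-- ===== Notes on version B (the rewrite author's own statement) =====
-- stated objective: alternative
-- what changed: B drops the sort entirely: it enumerates each distinct weight once (tracking seen weights in a set) and for each candidate threshold counts, by a direct pass, how many people it classifies correctly, returning the maximum directly instead of A's sort-then-run-scan that minimises misclassifications and subtracts from N.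
import Mathlib
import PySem

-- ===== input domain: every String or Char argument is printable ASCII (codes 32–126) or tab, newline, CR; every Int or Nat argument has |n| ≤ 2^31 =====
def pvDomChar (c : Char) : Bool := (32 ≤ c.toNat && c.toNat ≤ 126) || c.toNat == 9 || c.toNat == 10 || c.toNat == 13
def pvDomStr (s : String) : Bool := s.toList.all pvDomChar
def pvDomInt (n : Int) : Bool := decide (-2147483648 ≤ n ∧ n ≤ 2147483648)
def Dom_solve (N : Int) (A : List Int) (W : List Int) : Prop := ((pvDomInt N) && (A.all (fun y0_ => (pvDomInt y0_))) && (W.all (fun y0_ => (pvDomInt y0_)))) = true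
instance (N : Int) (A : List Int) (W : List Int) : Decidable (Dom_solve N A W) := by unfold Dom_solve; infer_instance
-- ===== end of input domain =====

-- B replaces A's sort-and-scan by direct threshold enumeration over the distinct weights (alternative decomposition, not faster).


-- ===== PORT A =====
-- inner while loop: 'while j < N and W[j] == W[i]: cur += A[j]; j += 1'
-- (pyGetD is exact under Pre_solve: every index used is in range; the Nat fuel only bounds
--  the trip count — N.toNat suffices, see solve — and never changes the computed value)
def innerA (W2 A2 : List Int) (N wi : Int) : Nat → Int → Int → Int × Int
  | 0, j, cur => (j, cur)
  | fuel + 1, j, cur =>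
    if j < N ∧ PySem.List.pyGetD W2 j 0 = wi then
      innerA W2 A2 N wi fuel (j + 1) (cur + PySem.List.pyGetD A2 j 0)
    else (j, cur)

-- outer while loop: 'while i < N: …'
def outerA (A2 W2 : List Int) (N tot : Int) : Nat → Int → Int → Int → Int
  | 0, _, _, res => res
  | fuel + 1, i, cur, res =>
    if i < N then
      let p := innerA W2 A2 N (PySem.List.pyGetD W2 i 0) (fuel + 1) i cur
      outerA A2 W2 N tot fuel p.1 p.2 (min res (p.2 + N - tot - (p.1 - p.2)))
    else res

def solve (N : Int) (A : List Int) (W : List Int) : Int :=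
  let idx := PySem.List.sorted (PySem.List.pyRange 0 N 1) (fun i => PySem.List.pyGetD W i 0) false
  let A2 := idx.map (fun i => PySem.List.pyGetD A i 0)
  let W2 := idx.map (fun i => PySem.List.pyGetD W i 0)
  let tot := A2.sum
  let res := min tot (N - tot)
  N - outerA A2 W2 N tot N.toNat 0 0 res

-- ===== PORT B =====
def solve_alt (N : Int) (A : List Int) (W : List Int) : Int :=
  let tot := (PySem.List.pyRange 0 N 1).foldl (fun acc i => acc + PySem.List.pyGetD A i 0) 0
  let best := max tot (N - tot)
  let st := (PySem.List.pyRange 0 N 1).foldl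
    (fun (st : PySem.Set Int × Int) i =>
      let w := PySem.List.pyGetD W i 0
      if PySem.Set.contains st.1 w then st
      else
        let ks := (PySem.List.pyRange 0 N 1).foldl
          (fun (q : Int × Int) j =>
            if PySem.List.pyGetD W j 0 ≤ w then (q.1 + 1, q.2 + PySem.List.pyGetD A j 0) else q)
          (0, 0)
        (PySem.Set.add st.1 w, max st.2 (ks.1 + tot - 2 * ks.2)))
    (PySem.Set.empty, best)
  st.2

-- ===== PRECONDITION & SPEC =====
-- Pre_solve: exactly the inputs on which A returns (A raises IndexError via W[i]/A[i] iff N exceeds a length)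
def Pre_solve (N : Int) (A : List Int) (W : List Int) : Prop :=
  N ≤ (A.length : Int) ∧ N ≤ (W.length : Int)
instance (N : Int) (A : List Int) (W : List Int) : Decidable (Pre_solve N A W) := by
  unfold Pre_solve; infer_instance

def pvWitness_solve : Int × List Int × List Int := (3, ([1, 0, 1], [50, 30, 70]))

def Spec_solve (N : Int) (A : List Int) (W : List Int) (out : Int) : Prop := out = solve_alt N A W
instance (N : Int) (A : List Int) (W : List Int) (out : Int) : Decidable (Spec_solve N A W out) := by
  unfold Spec_solve; infer_instance

-- ===== CLAIM (what is proved, stated in full; the proofs are below) =====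
def Claim_equal_solve : Prop := ∀ (N : Int) (A : List Int) (W : List Int),
  Dom_solve N A W → Pre_solve N A W → Spec_solve N A W (solve N A W)

-- ===== LEMMAS AND PROOFS =====

-- counting helpers over pair lists (entries (a_i, w_i))
def cntLe (L : List (Int × Int)) (w0 : Int) : Int := ((L.filter (fun p => p.2 ≤ w0)).length : Int)
def sumLe (L : List (Int × Int)) (w0 : Int) : Int := ((L.filter (fun p => p.2 ≤ w0)).map Prod.fst).sum

-- structural form of A's inner while loop: (count, sum, rest) of the leading run of weight w0
def chop (w0 : Int) : List (Int × Int) → Int × Int × List (Int × Int)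
  | [] => (0, 0, [])
  | p :: t =>
    if p.2 = w0 then
      let c := chop w0 t
      (c.1 + 1, c.2.1 + p.1, c.2.2)
    else (0, 0, p :: t)

theorem cntLe_cons_pos {p : Int × Int} {w0 : Int} (t : List (Int × Int)) (h : p.2 ≤ w0) :
    cntLe (p :: t) w0 = cntLe t w0 + 1 := by
  unfold cntLe
  rw [List.filter_cons_of_pos (by simpa using h)]
  push_cast [List.length_cons]
  ring

theorem cntLe_cons_neg {p : Int × Int} {w0 : Int} (t : List (Int × Int)) (h : ¬ p.2 ≤ w0) :
    cntLe (p :: t) w0 = cntLe t w0 := by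
  unfold cntLe
  rw [List.filter_cons_of_neg (by simpa using h)]

theorem sumLe_cons_pos {p : Int × Int} {w0 : Int} (t : List (Int × Int)) (h : p.2 ≤ w0) :
    sumLe (p :: t) w0 = p.1 + sumLe t w0 := by
  unfold sumLe
  rw [List.filter_cons_of_pos (by simpa using h)]
  simp

theorem sumLe_cons_neg {p : Int × Int} {w0 : Int} (t : List (Int × Int)) (h : ¬ p.2 ≤ w0) :
    sumLe (p :: t) w0 = sumLe t w0 := by
  unfold sumLe
  rw [List.filter_cons_of_neg (by simpa using h)]

theorem cntLe_append (l1 l2 : List (Int × Int)) (w0 : Int) :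
    cntLe (l1 ++ l2) w0 = cntLe l1 w0 + cntLe l2 w0 := by
  unfold cntLe
  rw [List.filter_append]
  push_cast [List.length_append]
  ring

theorem sumLe_append (l1 l2 : List (Int × Int)) (w0 : Int) :
    sumLe (l1 ++ l2) w0 = sumLe l1 w0 + sumLe l2 w0 := by
  unfold sumLe
  rw [List.filter_append, List.map_append, List.sum_append]

theorem cntLe_eq_self (l : List (Int × Int)) (w0 : Int) (h : ∀ p ∈ l, p.2 ≤ w0) :
    cntLe l w0 = (l.length : Int) := by
  unfold cntLe
  rw [List.filter_eq_self.mpr (by intro p hp; simpa using h p hp)]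

theorem sumLe_eq_self (l : List (Int × Int)) (w0 : Int) (h : ∀ p ∈ l, p.2 ≤ w0) :
    sumLe l w0 = (l.map Prod.fst).sum := by
  unfold sumLe
  rw [List.filter_eq_self.mpr (by intro p hp; simpa using h p hp)]

theorem cntLe_eq_zero (l : List (Int × Int)) (w0 : Int) (h : ∀ p ∈ l, w0 < p.2) :
    cntLe l w0 = 0 := by
  unfold cntLe
  rw [List.filter_eq_nil_iff.mpr (by intro p hp; simpa using not_le.mpr (h p hp))]
  simp

theorem sumLe_eq_zero (l : List (Int × Int)) (w0 : Int) (h : ∀ p ∈ l, w0 < p.2) :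
    sumLe l w0 = 0 := by
  unfold sumLe
  rw [List.filter_eq_nil_iff.mpr (by intro p hp; simpa using not_le.mpr (h p hp))]
  simp

theorem chop_spec (w0 : Int) (L : List (Int × Int)) :
    chop w0 L = (((L.takeWhile (fun p => p.2 == w0)).length : Int),
      (((L.takeWhile (fun p => p.2 == w0)).map Prod.fst).sum,
       L.dropWhile (fun p => p.2 == w0))) := by
  induction L with
  | nil => simp [chop]
  | cons p t ih =>
    by_cases h : p.2 = w0
    · rw [List.takeWhile_cons_of_pos (by simpa using h),
        List.dropWhile_cons_of_pos (by simpa using h)]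
      simp only [chop, if_pos h, ih, List.map_cons, List.sum_cons, List.length_cons,
        Prod.mk.injEq]
      and_intros <;> first
        | (push_cast; ring)
        | trivial
    · rw [List.takeWhile_cons_of_neg (by simpa using h),
        List.dropWhile_cons_of_neg (by simpa using h)]
      simp [chop, h]

theorem chop_cons_pos {p : Int × Int} {w0 : Int} (t : List (Int × Int)) (h : p.2 = w0) :
    chop w0 (p :: t) = ((chop w0 t).1 + 1, (chop w0 t).2.1 + p.1, (chop w0 t).2.2) := by
  simp [chop, h]

theorem chop_cons_neg {p : Int × Int} {w0 : Int} (t : List (Int × Int)) (h : ¬ p.2 = w0) :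
    chop w0 (p :: t) = (0, 0, p :: t) := by
  simp [chop, h]

theorem dropWhile_eq_drop {α : Type} (p : α → Bool) :
    ∀ l : List α, l.dropWhile p = l.drop (l.takeWhile p).length := by
  intro l
  induction l with
  | nil => simp
  | cons a t ih =>
    by_cases h : p a
    · rw [List.takeWhile_cons_of_pos h, List.dropWhile_cons_of_pos h]
      simpa using ih
    · rw [List.takeWhile_cons_of_neg h, List.dropWhile_cons_of_neg h]
      simp

theorem chop_rest_length_lt (p : Int × Int) (t : List (Int × Int)) :
    ((chop p.2 (p :: t)).2.2).length < (p :: t).length := by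
  rw [chop_spec, List.dropWhile_cons_of_pos (by simp)]
  simp only [List.length_cons, Nat.lt_succ_iff]
  exact List.length_dropWhile_le _ _

-- structural form of A's outer while loop over the runs of the sorted list
def runsA (N tot : Int) (rest : List (Int × Int)) (pos cur res : Int) : Int :=
  match rest with
  | [] => res
  | p :: t =>
    let c := chop p.2 (p :: t)
    runsA N tot c.2.2 (pos + c.1) (cur + c.2.1)
      (min res ((cur + c.2.1) + N - tot - ((pos + c.1) - (cur + c.2.1))))
termination_by rest.length
decreasing_by exact chop_rest_length_lt p t

-- distinct values, first occurrences
def dds : List Int → List Int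
  | [] => []
  | x :: t => x :: dds (t.filter (fun y => y ≠ x))
termination_by l => l.length
decreasing_by
  simp only [List.length_cons, Nat.lt_succ_iff, List.length_unattach]
  exact le_trans (List.length_filter_le _ _) (by simp)

theorem mem_dds_aux : ∀ (m : Nat) (l : List Int), l.length ≤ m → ∀ (x : Int),
    (x ∈ dds l ↔ x ∈ l) := by
  intro m
  induction m with
  | zero =>
    intro l hl x
    have : l = [] := List.length_eq_zero_iff.mp (Nat.le_zero.mp hl)
    subst this; simp only [dds]
  | succ m ih =>
    intro l hl x
    match l with
    | [] => simp only [dds]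
    | y :: t =>
      simp only [dds]
      have hlen : (t.filter (fun z => z ≠ y)).length ≤ m :=
        le_trans (List.length_filter_le _ _) (by simpa using hl)
      simp only [List.mem_cons, ih _ hlen x, List.mem_filter]
      by_cases hx : x = y <;> simp [hx]

theorem mem_dds (l : List Int) (x : Int) : x ∈ dds l ↔ x ∈ l :=
  mem_dds_aux l.length l le_rfl x

-- distinct values not yet in the seen-set (B's outer loop skeleton)
def dfrom : PySem.Set Int → List Int → List Int
  | _, [] => []
  | s, x :: t => if PySem.Set.contains s x then dfrom s t else x :: dfrom (PySem.Set.add s x) t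

theorem mem_dfrom (l : List Int) : ∀ (s : PySem.Set Int) (x : Int),
    x ∈ dfrom s l ↔ x ∈ l ∧ x ∉ s := by
  induction l with
  | nil => simp [dfrom]
  | cons y t ih =>
    intro s x
    rw [dfrom]
    by_cases hy : PySem.Set.contains s y
    · have hys : y ∈ s := by simpa [PySem.Set.contains, List.contains_iff_mem] using hy
      rw [if_pos hy, ih]
      constructor
      · rintro ⟨hxt, hxs⟩; exact ⟨List.mem_cons_of_mem _ hxt, hxs⟩
      · rintro ⟨hor, hxs⟩
        rcases List.mem_cons.mp hor with h | h
        · exact absurd (h ▸ hys) hxs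
        · exact ⟨h, hxs⟩
    · have hys : y ∉ s := by simpa [PySem.Set.contains, List.contains_iff_mem] using hy
      have hadd : PySem.Set.add s y = s ++ [y] := by
        simp only [PySem.Set.add]
        rw [if_neg (by simpa [PySem.Set.contains] using hy)]
      rw [if_neg hy]
      simp only [List.mem_cons, ih, hadd, List.mem_append]
      by_cases hx : x = y
      · subst hx; simp [hys]
      · simp [hx]

-- innerA computes chop on the zipped suffix
theorem innerA_eq_chop (A2 W2 : List Int) (hlen : A2.length = W2.length)
    (N : Int) (hN : N = (W2.length : Int)) (wi : Int) :
    ∀ (fuel : Nat) (j cur : Int), 0 ≤ j → j ≤ N → N - j ≤ (fuel : Int) →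
      innerA W2 A2 N wi fuel j cur =
        (j + (chop wi ((A2.zip W2).drop j.toNat)).1,
         cur + (chop wi ((A2.zip W2).drop j.toNat)).2.1) := by
  intro fuel
  induction fuel with
  | zero =>
    intro j cur h0 hjN hm
    have hdrop : (A2.zip W2).drop j.toNat = [] := by
      apply List.drop_eq_nil_of_le
      rw [List.length_zip]
      omega
    rw [hdrop]
    simp [innerA, chop]
  | succ m ih =>
    intro j cur h0 hjN hm
    by_cases hiN : j < N
    · have hkW : j.toNat < W2.length := by omega
      have hkA : j.toNat < A2.length := by omega
      have hkz : j.toNat < (A2.zip W2).length := by rw [List.length_zip]; omega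
      have hx : PySem.List.pyGetD W2 j 0 = W2[j.toNat]'hkW := by
        conv_lhs => rw [← Int.toNat_of_nonneg h0]
        rw [PySem.List.pyGetD_natCast, List.getD_eq_getElem _ _ hkW]
      have ha : PySem.List.pyGetD A2 j 0 = A2[j.toNat]'hkA := by
        conv_lhs => rw [← Int.toNat_of_nonneg h0]
        rw [PySem.List.pyGetD_natCast, List.getD_eq_getElem _ _ hkA]
      have hdrop : (A2.zip W2).drop j.toNat
          = (A2[j.toNat]'hkA, W2[j.toNat]'hkW) :: (A2.zip W2).drop (j.toNat + 1) := by
        rw [List.drop_eq_getElem_cons hkz, List.getElem_zip]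
      by_cases hw : W2[j.toNat]'hkW = wi
      · rw [innerA, if_pos ⟨hiN, by rw [hx]; exact hw⟩]
        rw [ih (j + 1) (cur + PySem.List.pyGetD A2 j 0) (by omega) (by omega) (by omega)]
        have h1 : (j + 1).toNat = j.toNat + 1 := by omega
        rw [h1, hdrop, chop_cons_pos _ hw, ha]
        simp only [Prod.mk.injEq]
        constructor <;> ring
      · rw [innerA, if_neg (by rintro ⟨_, hq⟩; rw [hx] at hq; exact hw hq)]
        rw [hdrop, chop_cons_neg _ hw]
        simp
    · have hdrop : (A2.zip W2).drop j.toNat = [] := by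
        apply List.drop_eq_nil_of_le
        rw [List.length_zip]
        omega
      rw [innerA, if_neg (by rintro ⟨h1, _⟩; omega), hdrop]
      simp [chop]

-- outerA computes runsA on the zipped suffix
theorem outerA_eq_runsA (A2 W2 : List Int) (hlen : A2.length = W2.length)
    (N : Int) (hN : N = (W2.length : Int)) (tot : Int) :
    ∀ (fuel : Nat) (i cur res : Int), 0 ≤ i → i ≤ N → N - i ≤ (fuel : Int) →
      outerA A2 W2 N tot fuel i cur res = runsA N tot ((A2.zip W2).drop i.toNat) i cur res := by
  intro fuel
  induction fuel with
  | zero =>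
    intro i cur res h0 hiN hm
    have hdrop : (A2.zip W2).drop i.toNat = [] := by
      apply List.drop_eq_nil_of_le
      rw [List.length_zip]
      omega
    rw [hdrop]
    simp [outerA, runsA]
  | succ m ih =>
    intro i cur res h0 hiN hm
    by_cases hlt : i < N
    · have hkW : i.toNat < W2.length := by omega
      have hkA : i.toNat < A2.length := by omega
      have hkz : i.toNat < (A2.zip W2).length := by rw [List.length_zip]; omega
      have hx : PySem.List.pyGetD W2 i 0 = W2[i.toNat]'hkW := by
        conv_lhs => rw [← Int.toNat_of_nonneg h0]
        rw [PySem.List.pyGetD_natCast, List.getD_eq_getElem _ _ hkW]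
      have hdrop : (A2.zip W2).drop i.toNat
          = (A2[i.toNat]'hkA, W2[i.toNat]'hkW) :: (A2.zip W2).drop (i.toNat + 1) := by
        rw [List.drop_eq_getElem_cons hkz, List.getElem_zip]
      set q : Int × Int := (A2[i.toNat]'hkA, W2[i.toNat]'hkW) with hq
      set t' : List (Int × Int) := (A2.zip W2).drop (i.toNat + 1) with ht'
      have hchop : chop (W2[i.toNat]'hkW) ((A2.zip W2).drop i.toNat)
          = (((((A2.zip W2).drop i.toNat).takeWhile (fun p => p.2 == W2[i.toNat]'hkW)).length : Int),
             (((((A2.zip W2).drop i.toNat).takeWhile (fun p => p.2 == W2[i.toNat]'hkW)).map Prod.fst).sum,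
              ((A2.zip W2).drop i.toNat).dropWhile (fun p => p.2 == W2[i.toNat]'hkW))) :=
        chop_spec _ _
      have htw_len_ge : 1 ≤ (((A2.zip W2).drop i.toNat).takeWhile (fun p => p.2 == W2[i.toNat]'hkW)).length := by
        rw [hdrop, List.takeWhile_cons_of_pos (by simp [hq])]
        simp
      have htw_len_le : (((A2.zip W2).drop i.toNat).takeWhile (fun p => p.2 == W2[i.toNat]'hkW)).length
          ≤ ((A2.zip W2).drop i.toNat).length :=
        (List.takeWhile_sublist _).length_le
      have hdroplen : ((A2.zip W2).drop i.toNat).length = (A2.zip W2).length - i.toNat :=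
        List.length_drop
      have hzlen : (A2.zip W2).length = W2.length := by rw [List.length_zip]; omega
      set L : Nat := (((A2.zip W2).drop i.toNat).takeWhile (fun p => p.2 == W2[i.toNat]'hkW)).length with hL
      rw [outerA, if_pos hlt]
      simp only []
      rw [innerA_eq_chop A2 W2 hlen N hN _ (m + 1) i cur h0 (le_of_lt hlt) (by omega)]
      rw [hx, hchop]
      conv_rhs => rw [hdrop]
      rw [runsA]
      simp only []
      conv_rhs => rw [← hdrop]
      have hq2 : q.2 = W2[i.toNat]'hkW := rfl
      rw [hq2, hchop]
      simp only []
      have hrest : ((A2.zip W2).drop i.toNat).dropWhile (fun p => p.2 == W2[i.toNat]'hkW)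
          = (A2.zip W2).drop ((i + (L : Int)).toNat) := by
        rw [dropWhile_eq_drop, List.drop_drop, ← hL]
        congr 1
        omega
      rw [hrest, ih (i + (L : Int)) (cur + ((((A2.zip W2).drop i.toNat).takeWhile (fun p => p.2 == W2[i.toNat]'hkW)).map Prod.fst).sum) _ (by omega) (by omega) (by omega)]
    · have hdrop : (A2.zip W2).drop i.toNat = [] := by
        apply List.drop_eq_nil_of_le
        rw [List.length_zip]
        omega
      rw [outerA, if_neg hlt, hdrop]
      simp only [runsA]

-- the crux: on a sorted list, runsA takes the min of the candidate at each distinct weight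
theorem runsA_spec (N tot : Int) (S0 : List (Int × Int))
    (hs : S0.Pairwise (fun p q => p.2 ≤ q.2)) :
    ∀ (m : Nat) (pre rest : List (Int × Int)), rest.length ≤ m →
      S0 = pre ++ rest → (∀ p ∈ pre, ∀ q ∈ rest, p.2 < q.2) →
      ∀ res, runsA N tot rest ((pre.length : Int)) ((pre.map Prod.fst).sum) res
        = (dds (rest.map Prod.snd)).foldl
            (fun acc w0 => min acc (2 * sumLe S0 w0 + N - tot - cntLe S0 w0)) res := by
  intro m
  induction m with
  | zero =>
    intro pre rest hlm hS0 hcross res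
    have hr : rest = [] := List.length_eq_zero_iff.mp (Nat.le_zero.mp hlm)
    subst hr
    simp only [runsA, List.map_nil, dds, List.foldl_nil]
  | succ m ih =>
    intro pre rest hlm hS0 hcross res
    match rest with
    | [] => simp only [runsA, List.map_nil, dds, List.foldl_nil]
    | p :: t =>
      set tw : List (Int × Int) := (p :: t).takeWhile (fun q => q.2 == p.2) with htw
      set dw : List (Int × Int) := (p :: t).dropWhile (fun q => q.2 == p.2) with hdw
      have hsplit : tw ++ dw = p :: t := List.takeWhile_append_dropWhile
      have htw_all : ∀ x ∈ tw, x.2 = p.2 := by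
        intro x hx
        simpa using List.mem_takeWhile_imp hx
      have hrest_pw : (p :: t).Pairwise (fun a b => a.2 ≤ b.2) :=
        (List.pairwise_append.mp (hS0 ▸ hs)).2.1
      have hhead_le : ∀ x ∈ t, p.2 ≤ x.2 := (List.pairwise_cons.mp hrest_pw).1
      have hdw_pw : dw.Pairwise (fun a b => a.2 ≤ b.2) :=
        List.Pairwise.sublist (List.dropWhile_sublist _) hrest_pw
      have hdw_sub : ∀ x ∈ dw, x ∈ p :: t := fun x hx => (List.dropWhile_sublist _).subset hx
      have hdw_gt : ∀ x ∈ dw, p.2 < x.2 := by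
        match hdwe : dw with
        | [] => simp
        | q0 :: r0 =>
          have hq0ne : ¬ ((q0.2 == p.2) = true) := by
            have hne : (p :: t).dropWhile (fun q => q.2 == p.2) ≠ [] := by
              rw [← hdw, hdwe]; simp
            have hthis := List.head_dropWhile_not (fun q : Int × Int => q.2 == p.2) (l := p :: t) hne
            have h3 : List.dropWhile (fun q : Int × Int => q.2 == p.2) (p :: t) = q0 :: r0 :=
              hdw.symm.trans hdwe
            simp only [h3, List.head_cons] at hthis
            simp [hthis]
          have hq0t : q0 ∈ t := by
            have := hdw_sub q0 (by rw [hdwe]; simp)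
            rcases List.mem_cons.mp this with h | h
            · exact absurd (by rw [h]; exact beq_self_eq_true _) hq0ne
            · exact h
          have hq0 : p.2 < q0.2 :=
            lt_of_le_of_ne (hhead_le q0 hq0t) (fun he => hq0ne (beq_iff_eq.mpr he.symm))
          intro x hx
          rcases List.mem_cons.mp hx with h | h
          · rw [h]; exact hq0
          · have hle : q0.2 ≤ x.2 := by
              have := hdwe ▸ hdw_pw
              exact (List.pairwise_cons.mp this).1 x h
            omega
      have hpre_le : ∀ x ∈ pre, x.2 ≤ p.2 := fun x hx =>
        le_of_lt (hcross x hx p (by simp))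
      have hcnt : cntLe S0 p.2 = (pre.length : Int) + (tw.length : Int) := by
        conv_lhs => rw [hS0, ← hsplit, cntLe_append, cntLe_append]
        rw [cntLe_eq_self pre _ hpre_le,
          cntLe_eq_self tw _ (fun x hx => le_of_eq (htw_all x hx)),
          cntLe_eq_zero dw _ hdw_gt]
        ring
      have hsum : sumLe S0 p.2 = (pre.map Prod.fst).sum + (tw.map Prod.fst).sum := by
        conv_lhs => rw [hS0, ← hsplit, sumLe_append, sumLe_append]
        rw [sumLe_eq_self pre _ hpre_le,
          sumLe_eq_self tw _ (fun x hx => le_of_eq (htw_all x hx)),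
          sumLe_eq_zero dw _ hdw_gt]
        ring
      have hdw_t : dw = t.dropWhile (fun q => q.2 == p.2) := by
        rw [hdw, List.dropWhile_cons_of_pos (by simp)]
      have ht_split : t = (t.takeWhile (fun q => q.2 == p.2)) ++ dw := by
        rw [hdw_t, List.takeWhile_append_dropWhile]
      have hfilt : (t.map Prod.snd).filter (fun y => y ≠ p.2) = dw.map Prod.snd := by
        conv_lhs => rw [ht_split, List.map_append, List.filter_append]
        have h1 : ((t.takeWhile (fun q => q.2 == p.2)).map Prod.snd).filter (fun y => y ≠ p.2) = [] := by
          rw [List.filter_eq_nil_iff]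
          intro y hy
          rcases List.mem_map.mp hy with ⟨x, hx, hxy⟩
          have : x.2 = p.2 := by simpa using List.mem_takeWhile_imp hx
          simp [← hxy, this]
        have h2 : (dw.map Prod.snd).filter (fun y => y ≠ p.2) = dw.map Prod.snd := by
          rw [List.filter_eq_self]
          intro y hy
          rcases List.mem_map.mp hy with ⟨x, hx, hxy⟩
          have := hdw_gt x hx
          simp only [← hxy]
          simpa using (by omega : x.2 ≠ p.2)
        rw [h1, h2, List.nil_append]
      have hdds : dds ((p :: t).map Prod.snd) = p.2 :: dds (dw.map Prod.snd) := by
        rw [List.map_cons]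
        simp only [dds]
        rw [hfilt]
      -- one step of runsA
      simp only [runsA]
      rw [chop_spec]
      simp only [← htw, ← hdw]
      have hpos : ((pre.length : Int) + (tw.length : Int)) = (((pre ++ tw).length : Int)) := by
        push_cast [List.length_append]
        ring
      have hcur : ((pre.map Prod.fst).sum + (tw.map Prod.fst).sum) = (((pre ++ tw).map Prod.fst).sum) := by
        rw [List.map_append, List.sum_append]
      rw [hpos, hcur]
      have hdwlen : dw.length ≤ m := by
        have h1 : dw.length ≤ t.length := by
          rw [hdw_t]
          exact (List.dropWhile_sublist _).length_le
        have h2 : (p :: t).length ≤ m + 1 := hlm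
        simp only [List.length_cons] at h2
        omega
      have hcross' : ∀ x ∈ pre ++ tw, ∀ q ∈ dw, x.2 < q.2 := by
        intro x hx q hq
        rcases List.mem_append.mp hx with h | h
        · exact hcross x h q (hdw_sub q hq)
        · rw [htw_all x h]
          exact hdw_gt q hq
      rw [ih (pre ++ tw) dw hdwlen (by rw [hS0, ← hsplit, List.append_assoc]) hcross']
      rw [hdds, List.foldl_cons]
      have hcand : ((pre.map Prod.fst).sum + (tw.map Prod.fst).sum) + N - tot
            - (((pre.length : Int) + (tw.length : Int)) - ((pre.map Prod.fst).sum + (tw.map Prod.fst).sum))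
          = 2 * sumLe S0 p.2 + N - tot - cntLe S0 p.2 := by
        rw [hcnt, hsum]
        ring
      rw [← hpos, ← hcur, hcand]

-- N - (running min) = running max of N - ·
theorem foldl_min_neg (N : Int) (g : Int → Int) :
    ∀ (l : List Int) (r : Int),
      N - l.foldl (fun acc w => min acc (g w)) r
        = l.foldl (fun acc w => max acc (N - g w)) (N - r) := by
  intro l
  induction l with
  | nil => intro r; simp
  | cons x t ih =>
    intro r
    simp only [List.foldl_cons]
    rw [ih (min r (g x)), show (N - min r (g x)) = max (N - r) (N - g x) from by omega]

theorem foldl_max_mem_proj (F : Int → Int) :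
    ∀ (l : List Int) (b : Int),
      l.foldl (fun a x => max a (F x)) b = b ∨
        ∃ x ∈ l, l.foldl (fun a x => max a (F x)) b = F x := by
  intro l
  induction l with
  | nil => intro b; simp
  | cons y t ih =>
    intro b
    simp only [List.foldl_cons]
    rcases ih (max b (F y)) with h | ⟨x, hx, h⟩
    · by_cases hb : F y ≤ b
      · left; rw [h]; omega
      · right; exact ⟨y, by simp, by rw [h]; omega⟩
    · right; exact ⟨x, List.mem_cons_of_mem _ hx, h⟩

theorem foldl_max_eq_of_mem_iff (F : Int → Int) (l1 l2 : List Int)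
    (h : ∀ x, x ∈ l1 ↔ x ∈ l2) (b : Int) :
    l1.foldl (fun a x => max a (F x)) b = l2.foldl (fun a x => max a (F x)) b := by
  obtain ⟨hb1, hm1⟩ := PySem.List.le_foldl_max_int l1 F b
  obtain ⟨hb2, hm2⟩ := PySem.List.le_foldl_max_int l2 F b
  apply le_antisymm
  · rcases foldl_max_mem_proj F l1 b with he | ⟨x, hx, he⟩
    · rw [he]; exact hb2
    · rw [he]; exact hm2 x ((h x).mp hx)
  · rcases foldl_max_mem_proj F l2 b with he | ⟨x, hx, he⟩
    · rw [he]; exact hb1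
    · rw [he]; exact hm1 x ((h x).mpr hx)

-- B's inner counting loop, over index lists
theorem bInner (A W : List Int) (w : Int) :
    ∀ (l : List Int) (c s : Int),
      l.foldl (fun (q : Int × Int) j =>
          if PySem.List.pyGetD W j 0 ≤ w then (q.1 + 1, q.2 + PySem.List.pyGetD A j 0) else q) (c, s)
        = (c + cntLe (l.map (fun j => (PySem.List.pyGetD A j 0, PySem.List.pyGetD W j 0))) w,
           s + sumLe (l.map (fun j => (PySem.List.pyGetD A j 0, PySem.List.pyGetD W j 0))) w) := by
  intro l
  induction l with
  | nil => intro c s; simp [cntLe, sumLe]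
  | cons j t ih =>
    intro c s
    simp only [List.foldl_cons, List.map_cons]
    by_cases h : PySem.List.pyGetD W j 0 ≤ w
    · rw [if_pos h, ih,
        cntLe_cons_pos (p := (PySem.List.pyGetD A j 0, PySem.List.pyGetD W j 0)) _ h,
        sumLe_cons_pos (p := (PySem.List.pyGetD A j 0, PySem.List.pyGetD W j 0)) _ h]
      simp only [Prod.mk.injEq]
      constructor <;> ring
    · rw [if_neg h, ih,
        cntLe_cons_neg (p := (PySem.List.pyGetD A j 0, PySem.List.pyGetD W j 0)) _ h,
        sumLe_cons_neg (p := (PySem.List.pyGetD A j 0, PySem.List.pyGetD W j 0)) _ h]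

-- B's outer loop over index lists: seen-set fold = max-fold over the fresh distinct weights
theorem bOuter (W : List Int) (F : Int → Int) :
    ∀ (l : List Int) (s : PySem.Set Int) (b : Int),
      (l.foldl (fun (st : PySem.Set Int × Int) i =>
          if PySem.Set.contains st.1 (PySem.List.pyGetD W i 0) then st
          else (PySem.Set.add st.1 (PySem.List.pyGetD W i 0),
                max st.2 (F (PySem.List.pyGetD W i 0)))) (s, b)).2
        = (dfrom s (l.map (fun i => PySem.List.pyGetD W i 0))).foldl (fun acc w => max acc (F w)) b := by
  intro l
  induction l with
  | nil => intro s b; simp [dfrom]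
  | cons i t ih =>
    intro s b
    simp only [List.foldl_cons, List.map_cons, dfrom]
    by_cases h : PySem.Set.contains s (PySem.List.pyGetD W i 0)
    · rw [if_pos h, if_pos h, ih]
    · rw [if_neg h, if_neg h, ih]
      simp only [List.foldl_cons]

-- stable-sort naturality: sorting by a key through g commutes with mapping g
theorem map_insertBy {A B : Type} (g : A → B) (bf : A → A → Bool) (bg : B → B → Bool)
    (hb : ∀ a b, bf a b = bg (g a) (g b)) (x : A) :
    ∀ (ys : List A), (PySem.List.insertBy bf x ys).map g
      = PySem.List.insertBy bg (g x) (ys.map g) := by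
  intro ys
  induction ys with
  | nil => simp [PySem.List.insertBy]
  | cons y t ih =>
    by_cases h : bf x y
    · simp [PySem.List.insertBy, h, ← hb]
    · simp [PySem.List.insertBy, h, ← hb, ih]

theorem map_foldl_insertBy {A B : Type} (g : A → B) (bf : A → A → Bool) (bg : B → B → Bool)
    (hb : ∀ a b, bf a b = bg (g a) (g b)) :
    ∀ (xs : List A) (acc : List A),
      (xs.foldl (fun acc x => PySem.List.insertBy bf x acc) acc).map g
        = (xs.map g).foldl (fun acc y => PySem.List.insertBy bg y acc) (acc.map g) := by
  intro xs
  induction xs with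
  | nil => intro acc; simp
  | cons x t ih =>
    intro acc
    simp only [List.foldl_cons, List.map_cons, ih, map_insertBy g bf bg hb]

theorem map_sorted_key_comp {A B : Type} (g : A → B) (k : B → Int) (xs : List A) :
    (PySem.List.sorted xs (fun x => k (g x)) false).map g
      = PySem.List.sorted (xs.map g) k false := by
  rw [PySem.List.sorted_eq_foldl_insertBy, PySem.List.sorted_eq_foldl_insertBy]
  simpa using map_foldl_insertBy g _ _ (by intro a b; rfl) xs []

-- ===== VERDICT (by name: the statement is the Claim_ definition above) =====
theorem solve_spec : Claim_equal_solve := by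
  unfold Claim_equal_solve
  intro N A W _hdom hpre
  unfold Spec_solve
  obtain ⟨hA, hW⟩ := hpre
  by_cases hN : 0 ≤ N
  · set n : Nat := N.toNat with hn
    have hnA : n ≤ A.length := by omega
    have hnW : n ≤ W.length := by omega
    -- index ranges to prefixes
    have hrangeA : (PySem.List.pyRange 0 N 1).map (fun j => PySem.List.pyGetD A j 0) = A.take n := by
      have hsp : PySem.List.pyRange 0 ((A.length : Int)) 1
          = PySem.List.pyRange 0 N 1 ++ PySem.List.pyRange N ((A.length : Int)) 1 :=
        PySem.List.pyRange_one_append 0 N _ hN hA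
      have hfull := PySem.List.map_pyGetD_pyRange_zero' A 0
      rw [hsp, List.map_append] at hfull
      have hlen1 : ((PySem.List.pyRange 0 N 1).map (fun j => PySem.List.pyGetD A j 0)).length = n := by
        rw [List.length_map, PySem.List.length_pyRange_one]; omega
      have htk := List.take_left'
        (l₂ := (PySem.List.pyRange N ((A.length : Int)) 1).map (fun j => PySem.List.pyGetD A j 0))
        hlen1
      rw [hfull] at htk
      exact htk.symm
    have hrangeW : (PySem.List.pyRange 0 N 1).map (fun j => PySem.List.pyGetD W j 0) = W.take n := by
      have hsp : PySem.List.pyRange 0 ((W.length : Int)) 1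
          = PySem.List.pyRange 0 N 1 ++ PySem.List.pyRange N ((W.length : Int)) 1 :=
        PySem.List.pyRange_one_append 0 N _ hN hW
      have hfull := PySem.List.map_pyGetD_pyRange_zero' W 0
      rw [hsp, List.map_append] at hfull
      have hlen1 : ((PySem.List.pyRange 0 N 1).map (fun j => PySem.List.pyGetD W j 0)).length = n := by
        rw [List.length_map, PySem.List.length_pyRange_one]; omega
      have htk := List.take_left'
        (l₂ := (PySem.List.pyRange N ((W.length : Int)) 1).map (fun j => PySem.List.pyGetD W j 0))
        hlen1
      rw [hfull] at htk
      exact htk.symm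
    set P : List (Int × Int) := (A.take n).zip (W.take n) with hP
    have hzipP : (PySem.List.pyRange 0 N 1).map
        (fun j => (PySem.List.pyGetD A j 0, PySem.List.pyGetD W j 0)) = P := by
      rw [hP, ← hrangeA, ← hrangeW, List.zip_map']
    set S : List (Int × Int) := PySem.List.sorted P Prod.snd false with hS
    have hidxg : (PySem.List.sorted (PySem.List.pyRange 0 N 1)
          (fun i => PySem.List.pyGetD W i 0) false).map
          (fun j => (PySem.List.pyGetD A j 0, PySem.List.pyGetD W j 0)) = S := by
      have h1 : (PySem.List.sorted (PySem.List.pyRange 0 N 1)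
            (fun i => PySem.List.pyGetD W i 0) false).map
            (fun j => (PySem.List.pyGetD A j 0, PySem.List.pyGetD W j 0))
          = PySem.List.sorted ((PySem.List.pyRange 0 N 1).map
              (fun j => (PySem.List.pyGetD A j 0, PySem.List.pyGetD W j 0))) Prod.snd false :=
        map_sorted_key_comp _ Prod.snd _
      rw [h1, hzipP]
    have hA2 : (PySem.List.sorted (PySem.List.pyRange 0 N 1)
          (fun i => PySem.List.pyGetD W i 0) false).map (fun i => PySem.List.pyGetD A i 0)
        = S.map Prod.fst := by
      rw [← hidxg, List.map_map]
      rfl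
    have hW2 : (PySem.List.sorted (PySem.List.pyRange 0 N 1)
          (fun i => PySem.List.pyGetD W i 0) false).map (fun i => PySem.List.pyGetD W i 0)
        = S.map Prod.snd := by
      rw [← hidxg, List.map_map]
      rfl
    -- lengths and permutation facts
    have hlentA : (A.take n).length = n := by rw [List.length_take]; omega
    have hlentW : (W.take n).length = n := by rw [List.length_take]; omega
    have hlenP : P.length = n := by rw [hP, List.length_zip, hlentA, hlentW]; omega
    have hlenS : S.length = n := by rw [hS, PySem.List.length_sorted, hlenP]
    have hperm : S.Perm P := hS ▸ PySem.List.sorted_perm P Prod.snd false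
    have hPfst : P.map Prod.fst = A.take n := by
      rw [hP]; exact List.map_fst_zip (by rw [hlentA, hlentW])
    have hPsnd : P.map Prod.snd = W.take n := by
      rw [hP]; exact List.map_snd_zip (by rw [hlentA, hlentW])
    have hcntPS : ∀ w : Int, cntLe S w = cntLe P w := by
      intro w
      unfold cntLe
      rw [(hperm.filter _).length_eq]
    have hsumPS : ∀ w : Int, sumLe S w = sumLe P w := by
      intro w
      unfold sumLe
      rw [((hperm.filter _).map _).sum_eq]
    have htot : (S.map Prod.fst).sum = (A.take n).sum := by
      rw [(hperm.map _).sum_eq, hPfst]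
    -- A side
    unfold solve
    simp only []
    rw [hA2, hW2]
    have hzipS : (S.map Prod.fst).zip (S.map Prod.snd) = S := by
      rw [List.zip_map']
      simp
    have houter := outerA_eq_runsA (S.map Prod.fst) (S.map Prod.snd)
      (by simp) N (by simp [List.length_map, hlenS]; omega) ((S.map Prod.fst).sum)
      N.toNat 0 0 (min (S.map Prod.fst).sum (N - (S.map Prod.fst).sum))
      le_rfl hN (by omega)
    rw [hzipS] at houter
    simp only [Int.toNat_zero, List.drop_zero] at houter
    rw [houter]
    have hsorted : S.Pairwise (fun p q => p.2 ≤ q.2) :=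
      hS ▸ PySem.List.sorted_pairwise P Prod.snd
    have hruns := runsA_spec N ((S.map Prod.fst).sum) S hsorted S.length [] S le_rfl rfl
      (by simp) (min (S.map Prod.fst).sum (N - (S.map Prod.fst).sum))
    simp only [List.length_nil, Nat.cast_zero, List.map_nil, List.sum_nil] at hruns
    rw [hruns, foldl_min_neg]
    -- B side
    unfold solve_alt
    simp only []
    rw [PySem.List.foldl_add (PySem.List.pyRange 0 N 1) (fun i => PySem.List.pyGetD A i 0) 0,
      hrangeA, zero_add]
    have hinner : ∀ w : Int, (PySem.List.pyRange 0 N 1).foldl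
        (fun (q : Int × Int) j =>
          if PySem.List.pyGetD W j 0 ≤ w then (q.1 + 1, q.2 + PySem.List.pyGetD A j 0) else q)
        (0, 0) = (cntLe P w, sumLe P w) := by
      intro w
      rw [bInner A W w (PySem.List.pyRange 0 N 1) 0 0, hzipP]
      simp
    simp only [hinner]
    rw [bOuter W (fun w => cntLe P w + (A.take n).sum - 2 * sumLe P w) (PySem.List.pyRange 0 N 1)
      PySem.Set.empty (max (A.take n).sum (N - (A.take n).sum)), hrangeW]
    -- align the two folds
    rw [htot]
    have hbase : N - min (A.take n).sum (N - (A.take n).sum)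
        = max (A.take n).sum (N - (A.take n).sum) := by omega
    rw [hbase]
    have hfun : (fun (acc w : Int) => max acc (N - (2 * sumLe S w + N - (A.take n).sum - cntLe S w)))
        = (fun (acc w : Int) => max acc (cntLe P w + (A.take n).sum - 2 * sumLe P w)) := by
      funext acc w
      rw [hcntPS w, hsumPS w]
      congr 1
      ring
    rw [hfun]
    apply foldl_max_eq_of_mem_iff
    intro x
    rw [mem_dds, mem_dfrom]
    have h1 : x ∈ S.map Prod.snd ↔ x ∈ W.take n := by
      rw [← hPsnd]
      exact (hperm.map Prod.snd).mem_iff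
    simp [h1, PySem.Set.empty]
  · -- N < 0 : both loops are empty
    have hr : PySem.List.pyRange 0 N 1 = [] := PySem.List.pyRange_one_eq_nil (by omega)
    unfold solve solve_alt
    simp only [hr, List.foldl_nil]
    have hsnil : PySem.List.sorted ([] : List Int) (fun i => PySem.List.pyGetD W i 0) false = [] := by
      rfl
    simp only [hsnil, List.map_nil, List.sum_nil]
    have hf : N.toNat = 0 := by omega
    rw [hf]
    simp only [outerA]
    omega
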